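-- pv_equiv track=rewrite | github.com/BillionsRichard/pycharmWorkspace | leetcode/graph/medium/regions_cut_by_slashes/srcs/my_answer.py | three_times_grid
-- ===== SOURCE A (Python) =====
-- def three_times_grid(grid: list):
--     """将每个方格转换成三行三列的0和1构成的新方格；用1表示存在斜线
--     如 输入为 : [ ' \',
--                  '/ ']
--         转化成：
--                [0 0 0 1 0 0
--                 0 0 0 0 1 0
--                 0 0 0 0 0 1
--                 0 0 1 0 0 0
--                 0 1 0 0 0 0
--                 1 0 0 0 0 0]
--     最终问题转换成求 0 的联通区域 个数。
--     """
--     grid_len = len(grid)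
--     new_len = 3 * grid_len
--     new_grid = [[0 for col in range(new_len)] for row in
--                 range(new_len)]
--
--     for i in range(grid_len):
--         for j in range(grid_len):
--             if grid[i][j] == '/':
--                 new_grid[3 * i][3 * j + 2] = 1
--                 new_grid[3 * i + 1][3 * j + 1] = 1
--                 new_grid[3 * i + 2][3 * j + 0] = 1
--             if grid[i][j] == '\\':
--                 new_grid[3 * i][3 * j] = 1
--                 new_grid[3 * i + 1][3 * j + 1] = 1
--                 new_grid[3 * i + 2][3 * j + 2] = 1
--     return new_grid
-- ===== SOURCE B (Python) =====
-- def three_times_grid(grid: list):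
--     n = 3 * len(grid)
--     return [[1 if (grid[r // 3][c // 3] == '/' and r % 3 + c % 3 == 2)
--              or (grid[r // 3][c // 3] == '\\' and r % 3 == c % 3) else 0
--              for c in range(n)]
--             for r in range(n)]
-- ===== Notes on version B (the rewrite author's own statement) =====
-- stated objective: simpler
-- what changed: Instead of zero-filling a 3N x 3N grid and scattering three writes per input square, B maps each output coordinate (r,c) directly to its value via a closed-form condition on r%3, c%3 and grid[r//3][c//3], as one nested comprehension with no mutation.
import Mathlib
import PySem

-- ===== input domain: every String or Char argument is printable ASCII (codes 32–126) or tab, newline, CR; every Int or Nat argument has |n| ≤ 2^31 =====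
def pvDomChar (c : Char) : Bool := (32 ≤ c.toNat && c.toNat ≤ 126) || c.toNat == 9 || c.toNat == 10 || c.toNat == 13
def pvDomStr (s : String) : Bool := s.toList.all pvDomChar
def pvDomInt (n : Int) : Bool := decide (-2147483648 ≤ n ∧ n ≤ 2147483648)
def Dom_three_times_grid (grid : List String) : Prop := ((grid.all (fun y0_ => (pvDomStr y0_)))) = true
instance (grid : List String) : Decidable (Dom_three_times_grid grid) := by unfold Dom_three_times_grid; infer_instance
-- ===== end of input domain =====

-- B rewrites A's scatter-write construction as one read-only map over output
-- coordinates (simpler: no mutation, one closed-form condition per cell).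

-- ===== PORT A =====
-- grid[i][j] for Nat indices; exact on Pre_ (every access in range there)
def pvCharAt (grid : List String) (i j : Nat) : Char :=
  ((grid.getD i "").toList).getD j ' '

-- new_grid[r][c] = v (both indices in range at every call site under Pre_)
def pvSet2 (g : List (List Int)) (r c : Nat) (v : Int) : List (List Int) :=
  g.set r ((g.getD r []).set c v)

-- the body of A's double loop for one square (i, j): first the '/' if, then the '\\' if
def pvSquare1 (grid : List String) (ng : List (List Int)) (i j : Nat) : List (List Int) :=
  if pvCharAt grid i j = '/' then
    pvSet2 (pvSet2 (pvSet2 ng (3*i) (3*j+2) 1) (3*i+1) (3*j+1) 1) (3*i+2) (3*j) 1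
  else ng

def pvSquare (grid : List String) (ng : List (List Int)) (i j : Nat) : List (List Int) :=
  if pvCharAt grid i j = '\\' then
    pvSet2 (pvSet2 (pvSet2 (pvSquare1 grid ng i j) (3*i) (3*j) 1) (3*i+1) (3*j+1) 1) (3*i+2) (3*j+2) 1
  else pvSquare1 grid ng i j

def three_times_grid (grid : List String) : List (List Int) :=
  let n := grid.length
  let N := 3 * n
  let ng0 := (List.range N).map (fun _ => (List.range N).map (fun _ => (0 : Int)))
  (List.range n).foldl (fun ng i =>
    (List.range n).foldl (fun ng j => pvSquare grid ng i j) ng) ng0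

-- ===== PORT B =====
-- the closed-form value of output cell (r, c)
def pvCell (grid : List String) (r c : Nat) : Int :=
  let ch := pvCharAt grid (r / 3) (c / 3)
  if (ch = '/' ∧ r % 3 + c % 3 = 2) ∨ (ch = '\\' ∧ r % 3 = c % 3) then 1 else 0

def three_times_grid_alt (grid : List String) : List (List Int) :=
  let N := 3 * grid.length
  (List.range N).map (fun r => (List.range N).map (fun c => pvCell grid r c))

-- ===== PRECONDITION & SPEC =====
-- Pre_ excludes exactly the inputs where A raises IndexError (a row shorter
-- than the number of rows); B raises there too.
def Pre_three_times_grid (grid : List String) : Prop :=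
  ∀ s ∈ grid, grid.length ≤ s.length
instance (grid : List String) : Decidable (Pre_three_times_grid grid) := by
  unfold Pre_three_times_grid; infer_instance

def pvWitness_three_times_grid : List String := [" \\", "/ "]

def Spec_three_times_grid (grid : List String) (out : List (List Int)) : Prop := out = three_times_grid_alt grid
instance (grid : List String) (out : List (List Int)) : Decidable (Spec_three_times_grid grid out) := by unfold Spec_three_times_grid; infer_instance

-- ===== CLAIM (what is proved, stated in full; the proofs are below) =====
def Claim_equal_three_times_grid : Prop := ∀ (grid : List String), Dom_three_times_grid grid → Pre_three_times_grid grid → Spec_three_times_grid grid (three_times_grid grid)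

-- ===== LEMMAS AND PROOFS =====

-- cell accessor used by the proofs
def gc (g : List (List Int)) (r c : Nat) : Int := (g.getD r []).getD c 0

theorem length_pvSet2 (g : List (List Int)) (r c : Nat) (v : Int) :
    (pvSet2 g r c v).length = g.length := by
  simp [pvSet2]

theorem rowlen_pvSet2 (g : List (List Int)) (r c : Nat) (v : Int) (r' : Nat) :
    ((pvSet2 g r c v).getD r' []).length = (g.getD r' []).length := by
  simp only [pvSet2, List.getD_eq_getElem?_getD, List.getElem?_set]
  by_cases h : r = r'
  · subst h
    by_cases h2 : r < g.length
    · simp [h2]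
    · simp [h2]
  · simp [h]

theorem length_pvSquare (grid : List String) (g : List (List Int)) (i j : Nat) :
    (pvSquare grid g i j).length = g.length := by
  unfold pvSquare pvSquare1
  split <;> split <;> simp [length_pvSet2]

theorem rowlen_pvSquare (grid : List String) (g : List (List Int)) (i j r : Nat) :
    ((pvSquare grid g i j).getD r []).length = (g.getD r []).length := by
  unfold pvSquare pvSquare1
  split <;> split <;> simp only [rowlen_pvSet2]

theorem gc_pvSet2 (g : List (List Int)) (r c : Nat) (v : Int) (r' c' : Nat)
    (hr : r < g.length) :
    gc (pvSet2 g r c v) r' c' =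
      if r = r' ∧ c = c' ∧ c < (g.getD r []).length then v else gc g r' c' := by
  unfold gc pvSet2
  simp only [List.getD_eq_getElem?_getD, List.getElem?_set]
  by_cases h : r = r'
  · subst h
    by_cases hc : c = c'
    · subst hc
      by_cases h2 : c < (g[r]?.getD []).length
      all_goals rw [List.getElem?_eq_getElem hr, Option.getD_some] at h2
      · simp [hr, h2]
      · simp [hr, h2]
    · simp [hr, hc]
  · simp [h]

-- value of every cell after processing square (i, j), assuming the block is 0
theorem gc_pvSquare (grid : List String) (g : List (List Int)) (i j : Nat)
    (hlen : g.length = 3 * grid.length)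
    (hrow : ∀ r, r < 3 * grid.length → (g.getD r []).length = 3 * grid.length)
    (hi : i < grid.length) (hj : j < grid.length)
    (hz : ∀ r c, r / 3 = i → c / 3 = j → gc g r c = 0) (r c : Nat) :
    gc (pvSquare grid g i j) r c =
      if r / 3 = i ∧ c / 3 = j then pvCell grid r c else gc g r c := by
  have hr0 : 3 * i < g.length := by omega
  have hr1 : 3 * i + 1 < g.length := by omega
  have hr2 : 3 * i + 2 < g.length := by omega
  have hrw : ∀ a, 3 * i + a < g.length → (g.getD (3 * i + a) []).length = 3 * grid.length := by
    intro a ha; exact hrow _ (by omega)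
  unfold pvSquare pvSquare1
  by_cases hs : pvCharAt grid i j = '\\'
  <;> by_cases hf : pvCharAt grid i j = '/'
  · rw [hf] at hs; exact absurd hs (by decide)
  · -- only '\'
    rw [if_pos hs, if_neg hf]
    rw [gc_pvSet2 _ _ _ _ _ _ (by simp [length_pvSet2]; omega),
        gc_pvSet2 _ _ _ _ _ _ (by simp [length_pvSet2]; omega),
        gc_pvSet2 _ _ _ _ _ _ (by omega)]
    simp only [rowlen_pvSet2, hrow _ (by omega : 3 * i < 3 * grid.length),
      hrow _ (by omega : 3 * i + 1 < 3 * grid.length),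
      hrow _ (by omega : 3 * i + 2 < 3 * grid.length)]
    by_cases hblk : r / 3 = i ∧ c / 3 = j
    · rw [if_pos hblk]
      unfold pvCell
      rw [hblk.1, hblk.2, hs]
      rw [hz r c hblk.1 hblk.2]
      simp only [show (('\\':Char) = '/') = False from by simp,
        false_and, true_and, false_or]
      split_ifs <;> omega
    · rw [if_neg hblk]
      split_ifs <;> first | rfl | omega
  · -- only '/'
    rw [if_neg hs, if_pos hf]
    rw [gc_pvSet2 _ _ _ _ _ _ (by simp [length_pvSet2]; omega),
        gc_pvSet2 _ _ _ _ _ _ (by simp [length_pvSet2]; omega),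
        gc_pvSet2 _ _ _ _ _ _ (by omega)]
    simp only [rowlen_pvSet2, hrow _ (by omega : 3 * i < 3 * grid.length),
      hrow _ (by omega : 3 * i + 1 < 3 * grid.length),
      hrow _ (by omega : 3 * i + 2 < 3 * grid.length)]
    by_cases hblk : r / 3 = i ∧ c / 3 = j
    · rw [if_pos hblk]
      unfold pvCell
      rw [hblk.1, hblk.2, hf]
      rw [hz r c hblk.1 hblk.2]
      simp only [show (('/':Char) = '\\') = False from by simp,
        false_and, true_and, or_false]
      split_ifs <;> omega
    · rw [if_neg hblk]
      split_ifs <;> first | rfl | omega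
  · -- neither
    rw [if_neg hs, if_neg hf]
    by_cases hblk : r / 3 = i ∧ c / 3 = j
    · rw [if_pos hblk, hz r c hblk.1 hblk.2]
      unfold pvCell
      rw [hblk.1, hblk.2]
      simp [hs, hf]
    · rw [if_neg hblk]

-- invariant for the folds: value after processing all squares before (k, m)
def tgt (grid : List String) (k m r c : Nat) : Int :=
  if (r / 3 < k ∨ (r / 3 = k ∧ c / 3 < m)) ∧ r < 3 * grid.length ∧ c < 3 * grid.length
  then pvCell grid r c else 0

theorem inner_fold (grid : List String) (g : List (List Int)) (i : Nat)
    (hlen : g.length = 3 * grid.length)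
    (hrow : ∀ r, r < 3 * grid.length → (g.getD r []).length = 3 * grid.length)
    (hi : i < grid.length) (m : Nat) (hm : m ≤ grid.length)
    (hg : ∀ r c, gc g r c = tgt grid i 0 r c) :
    ((List.range m).foldl (fun ng j => pvSquare grid ng i j) g).length = 3 * grid.length ∧
    (∀ r, r < 3 * grid.length → (((List.range m).foldl (fun ng j => pvSquare grid ng i j) g).getD r []).length = 3 * grid.length) ∧
    (∀ r c, gc ((List.range m).foldl (fun ng j => pvSquare grid ng i j) g) r c = tgt grid i m r c) := by
  induction m with
  | zero =>
    refine ⟨hlen, hrow, ?_⟩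
    intro r c; exact hg r c
  | succ m ih =>
    obtain ⟨h1, h2, h3⟩ := ih (by omega)
    rw [List.range_succ, List.foldl_append]
    simp only [List.foldl_cons, List.foldl_nil]
    set gm := (List.range m).foldl (fun ng j => pvSquare grid ng i j) g with hgm
    refine ⟨by rw [length_pvSquare]; exact h1, ?_, ?_⟩
    · intro r hrN; rw [rowlen_pvSquare]; exact h2 r hrN
    · intro r c
      rw [gc_pvSquare grid gm i m h1 h2 hi (by omega)
        (by intro r c hri hcm
            rw [h3 r c]
            unfold tgt
            rw [if_neg]
            omega)]
      by_cases hblk : r / 3 = i ∧ c / 3 = m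
      · rw [if_pos hblk]
        unfold tgt
        rw [if_pos (by omega)]
      · rw [if_neg hblk, h3 r c]
        unfold tgt
        split_ifs <;> first | rfl | omega

theorem gc_eq_getElem (g : List (List Int)) (r c : Nat) (hr : r < g.length)
    (hc : c < g[r].length) : gc g r c = g[r][c] := by
  unfold gc
  rw [List.getD_eq_getElem?_getD (l := g), List.getElem?_eq_getElem hr, Option.getD_some,
      List.getD_eq_getElem?_getD, List.getElem?_eq_getElem hc, Option.getD_some]

theorem zero_grid_facts (N : Nat) :
    ((List.range N).map (fun _ => (List.range N).map (fun _ => (0 : Int)))).length = N ∧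
    (∀ r, r < N → ((((List.range N).map (fun _ => (List.range N).map (fun _ => (0 : Int)))).getD r []).length = N)) ∧
    (∀ r c, gc ((List.range N).map (fun _ => (List.range N).map (fun _ => (0 : Int)))) r c = 0) := by
  refine ⟨by simp, ?_, ?_⟩
  · intro r hr
    have hr' : r < ((List.range N).map (fun _ => (List.range N).map (fun _ => (0 : Int)))).length := by
      simpa using hr
    rw [List.getD_eq_getElem?_getD, List.getElem?_eq_getElem hr', Option.getD_some]
    simp
  · intro r c
    unfold gc
    by_cases hr : r < N
    · have hr' : r < ((List.range N).map (fun _ => (List.range N).map (fun _ => (0 : Int)))).length := by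
        simpa using hr
      rw [List.getD_eq_getElem?_getD (l := (List.range N).map (fun _ => (List.range N).map (fun _ => (0 : Int)))),
          List.getElem?_eq_getElem hr', Option.getD_some, List.getElem_map]
      rcases Nat.lt_or_ge c N with hc | hc
      · rw [List.getD_eq_getElem?_getD, List.getElem?_eq_getElem (by simpa using hc), Option.getD_some]
        simp
      · rw [List.getD_eq_getElem?_getD, List.getElem?_eq_none (by simpa using hc), Option.getD_none]
    · rw [List.getD_eq_getElem?_getD (l := (List.range N).map (fun _ => (List.range N).map (fun _ => (0 : Int)))),
          List.getElem?_eq_none (by simpa using Nat.le_of_not_lt hr), Option.getD_none]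
      simp

theorem outer_fold (grid : List String) (k : Nat) (hk : k ≤ grid.length) :
    (((List.range k).foldl (fun ng i =>
      (List.range grid.length).foldl (fun ng j => pvSquare grid ng i j) ng)
      ((List.range (3 * grid.length)).map (fun _ => (List.range (3 * grid.length)).map (fun _ => (0 : Int))))).length = 3 * grid.length) ∧
    (∀ r, r < 3 * grid.length → ((((List.range k).foldl (fun ng i =>
      (List.range grid.length).foldl (fun ng j => pvSquare grid ng i j) ng)
      ((List.range (3 * grid.length)).map (fun _ => (List.range (3 * grid.length)).map (fun _ => (0 : Int))))).getD r []).length = 3 * grid.length)) ∧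
    (∀ r c, gc ((List.range k).foldl (fun ng i =>
      (List.range grid.length).foldl (fun ng j => pvSquare grid ng i j) ng)
      ((List.range (3 * grid.length)).map (fun _ => (List.range (3 * grid.length)).map (fun _ => (0 : Int))))) r c = tgt grid k 0 r c) := by
  induction k with
  | zero =>
    obtain ⟨h1, h2, h3⟩ := zero_grid_facts (3 * grid.length)
    refine ⟨h1, h2, ?_⟩
    intro r c
    simp only [List.range_zero, List.foldl_nil]
    rw [h3 r c]
    unfold tgt
    rw [if_neg (by omega)]
  | succ k ih =>
    obtain ⟨h1, h2, h3⟩ := ih (by omega)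
    rw [List.range_succ, List.foldl_append]
    simp only [List.foldl_cons, List.foldl_nil]
    obtain ⟨g1, g2, g3⟩ := inner_fold grid _ k h1 h2 (by omega) grid.length le_rfl h3
    refine ⟨g1, g2, ?_⟩
    intro r c
    rw [g3 r c]
    unfold tgt
    split_ifs <;> first | rfl | omega

-- ===== VERDICT (by name: the statement is the Claim_ definition above) =====
theorem three_times_grid_spec : Claim_equal_three_times_grid := by
  intro grid _ _
  unfold Spec_three_times_grid
  obtain ⟨h1, h2, h3⟩ := outer_fold grid grid.length le_rfl
  have hA : three_times_grid grid = (List.range grid.length).foldl (fun ng i =>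
      (List.range grid.length).foldl (fun ng j => pvSquare grid ng i j) ng)
      ((List.range (3 * grid.length)).map (fun _ => (List.range (3 * grid.length)).map (fun _ => (0 : Int)))) := rfl
  rw [hA]
  refine List.ext_getElem ?_ ?_
  · rw [h1]; simp only [three_times_grid_alt, List.length_map, List.length_range]
  · intro r hr hr'
    have hrN : r < 3 * grid.length := by rwa [h1] at hr
    have hrowlen := h2 r hrN
    rw [List.getD_eq_getElem?_getD, List.getElem?_eq_getElem hr, Option.getD_some] at hrowlen
    refine List.ext_getElem ?_ ?_
    · rw [hrowlen]
      simp only [three_times_grid_alt, List.getElem_map, List.getElem_range, List.length_map, List.length_range]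
    · intro c hc hc'
      have hcN : c < 3 * grid.length := by rwa [hrowlen] at hc
      have hv := h3 r c
      rw [gc_eq_getElem _ _ _ hr hc] at hv
      rw [hv]
      unfold tgt
      rw [if_pos ⟨Or.inl (by omega), hrN, hcN⟩]
      simp only [three_times_grid_alt, List.getElem_map, List.getElem_range]
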